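-- pv_equiv track=rewrite | github.com/aman-berhe/Scene_Linking | Scene_Linking_Project/Evaluations.py | computeMissedLinks
-- ===== SOURCE A (Python) =====
-- def intersection(sceneGrouping1, scenesGrouping2):
--     """
--     intesection of two grouping of scene. The first grouping is the Ground truth and the second one is computed grouping
--     """
--     lst3 = [value for value in sceneGrouping1 if value in scenesGrouping2]
--     return lst3
--
-- def computeMissedLinks(scenesGrouped, intersect):
--     """
--     Compute missing links: Missed pairs from the ground truth grouping
--     """
--     paired=[]
--     for sg in scenesGrouped:
--         tmpMax=0
--         for i in range(len(intersect)):
--             if tmpMax<len(intersection(sg,intersect[i])):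
--                 tmpMax=len(intersection(sg,intersect[i]))
--         paired.append(tmpMax)
--     missedLinks=[len(scenesGrouped[p])-paired[p]-1 if paired[p]>1 else len(scenesGrouped[p])-paired[p] for p in range(len(paired))]
--
--     return missedLinks
-- ===== SOURCE B (Python) =====
-- def computeMissedLinks(scenesGrouped, intersect):
--     """
--     Compute missing links: Missed pairs from the ground truth grouping
--     """
--     # inverted index: scene -> list of group indices whose group contains it
--     postings = [(x, i) for i, g in enumerate(intersect) for x in set(g)]
--     index = {}
--     for x, i in postings:
--         index.setdefault(x, []).append(i)
--     missedLinks = []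
--     for sg in scenesGrouped:
--         votes = [0] * len(intersect)
--         for x in sg:
--             for i in index.get(x, []):
--                 votes[i] += 1
--         paired = max(votes, default=0)
--         n = len(sg)
--         missedLinks.append(n - paired - 1 if paired > 1 else n - paired)
--     return missedLinks
-- ===== Notes on version B (the rewrite author's own statement) =====
-- stated objective: faster
-- what changed: B inverts the data flow: it builds an inverted index from scene to the group indices containing it once, then for each ground-truth group accumulates per-group-index overlap counts in a vote vector by scanning the group's elements and their postings, instead of A's per-pair membership-scan intersections (computed twice each) over every (scene group, computed group) pair.
import Mathlib
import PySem

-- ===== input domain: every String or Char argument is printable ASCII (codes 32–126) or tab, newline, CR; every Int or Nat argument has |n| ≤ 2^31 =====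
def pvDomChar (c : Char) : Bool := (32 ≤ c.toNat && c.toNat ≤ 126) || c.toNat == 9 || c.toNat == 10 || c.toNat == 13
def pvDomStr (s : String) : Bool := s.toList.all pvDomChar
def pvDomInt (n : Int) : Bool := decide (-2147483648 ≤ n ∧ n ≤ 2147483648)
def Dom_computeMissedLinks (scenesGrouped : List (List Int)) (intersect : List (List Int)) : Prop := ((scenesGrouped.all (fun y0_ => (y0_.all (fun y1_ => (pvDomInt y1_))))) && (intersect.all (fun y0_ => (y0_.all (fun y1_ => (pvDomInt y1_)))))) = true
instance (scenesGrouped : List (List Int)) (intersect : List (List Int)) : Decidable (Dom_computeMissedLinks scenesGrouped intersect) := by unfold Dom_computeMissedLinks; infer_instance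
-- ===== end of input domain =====

-- B inverts the data flow: a scene -> group-indices inverted index built once, then a per-group
-- vote vector accumulated by scanning each ground-truth group's elements (objective: faster;
-- same return value).

-- ===== PORT A =====
-- helper 'intersection' of Source A
def pvIntersection (sceneGrouping1 scenesGrouping2 : List Int) : List Int :=
  sceneGrouping1.filter (fun value => scenesGrouping2.contains value)

def computeMissedLinks (scenesGrouped : List (List Int)) (intersect : List (List Int)) : List Int :=
  let paired := scenesGrouped.foldl (fun paired sg =>
    let tmpMax := (PySem.List.pyRange 0 (PySem.List.len intersect) 1).foldl (fun tmpMax i =>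
      if tmpMax < PySem.List.len (pvIntersection sg (PySem.List.pyGetD intersect i [])) then
        PySem.List.len (pvIntersection sg (PySem.List.pyGetD intersect i []))
      else tmpMax) 0
    paired ++ [tmpMax]) []
  (PySem.List.pyRange 0 (PySem.List.len paired) 1).map (fun p =>
    if PySem.List.pyGetD paired p 0 > 1 then
      PySem.List.len (PySem.List.pyGetD scenesGrouped p []) - PySem.List.pyGetD paired p 0 - 1
    else
      PySem.List.len (PySem.List.pyGetD scenesGrouped p []) - PySem.List.pyGetD paired p 0)

-- ===== PORT B =====
-- postings = [(x, i) for i, g in enumerate(intersect) for x in set(g)]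
def pvPostings (intersect : List (List Int)) : List (Int × Int) :=
  (PySem.List.enumerate intersect).flatMap (fun p => (PySem.Set.ofList p.2).map (fun x => (x, p.1)))

-- index = {}; for x, i in postings: index.setdefault(x, []).append(i)
def pvIndex (intersect : List (List Int)) : PySem.Dict Int (List Int) :=
  (pvPostings intersect).foldl (fun d p => d.modify p.1 [] (fun l => l ++ [p.2])) PySem.Dict.empty

def computeMissedLinks_alt (scenesGrouped : List (List Int)) (intersect : List (List Int)) : List Int :=
  let index := pvIndex intersect
  scenesGrouped.foldl (fun missedLinks sg =>
    let votes := sg.foldl (fun v x =>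
      (index.getD x []).foldl (fun v i => PySem.List.pySetD v i (PySem.List.pyGetD v i 0 + 1)) v)
      (List.replicate intersect.length 0)
    let paired := PySem.List.maxD votes (fun v => v) 0
    let n := PySem.List.len sg
    missedLinks ++ [if paired > 1 then n - paired - 1 else n - paired]) []

-- ===== PRECONDITION & SPEC =====
def Spec_computeMissedLinks (scenesGrouped : List (List Int)) (intersect : List (List Int)) (out : List Int) : Prop := out = computeMissedLinks_alt scenesGrouped intersect
instance (scenesGrouped : List (List Int)) (intersect : List (List Int)) (out : List Int) : Decidable (Spec_computeMissedLinks scenesGrouped intersect out) := by unfold Spec_computeMissedLinks; infer_instance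

-- ===== CLAIM (what is proved, stated in full; the proofs are below) =====
def Claim_equal_computeMissedLinks : Prop := ∀ (scenesGrouped : List (List Int)) (intersect : List (List Int)), Dom_computeMissedLinks scenesGrouped intersect → Spec_computeMissedLinks scenesGrouped intersect (computeMissedLinks scenesGrouped intersect)

-- ===== LEMMAS AND PROOFS =====

-- the value A's inner loop maximises over, as a function of the group
def pvLenInter (sg g : List Int) : Int := PySem.List.len (pvIntersection sg g)

lemma pv_lenInter_nil (g : List Int) : pvLenInter [] g = 0 := by
  simp [pvLenInter, pvIntersection, PySem.List.len]

lemma pv_lenInter_cons (x : Int) (t g : List Int) :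
    pvLenInter (x :: t) g = (if x ∈ g then (1 : Int) else 0) + pvLenInter t g := by
  by_cases h : x ∈ g
  · simp [pvLenInter, pvIntersection, h, PySem.List.len]; omega
  · simp [pvLenInter, pvIntersection, h, PySem.List.len]

-- A's if-update is the binary max
lemma pv_upd_eq_max : (fun (m v : Int) => if m < v then v else m) = (fun m v => max m v) := by
  funext m v
  by_cases h : m < v
  · simp [h, max_eq_right h.le]
  · simp [h, max_eq_left (not_lt.mp h)]

-- A's running-max loop from 0 equals Python's max(..., default=0) on nonnegative values
lemma pv_fold_eq_maxD (L : List Int) (h : ∀ v ∈ L, 0 ≤ v) :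
    L.foldl (fun m v => if m < v then v else m) 0 = PySem.List.maxD L (fun v => v) 0 := by
  cases L with
  | nil => rfl
  | cons x t =>
    have hx : 0 ≤ x := h x (by simp)
    have hhead : (if (0 : Int) < x then x else 0) = x := by
      by_cases h0 : (0 : Int) < x
      · simp [h0]
      · simp [h0]; omega
    rw [PySem.List.maxD, PySem.List.max?_id_cons, Option.getD_some, List.foldl_cons, hhead,
      pv_upd_eq_max]

-- the inner loop of A, per scene group
lemma pv_tmpMax_eq (sg : List Int) (intersect : List (List Int)) :
    (PySem.List.pyRange 0 (PySem.List.len intersect) 1).foldl (fun tmpMax i =>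
      if tmpMax < PySem.List.len (pvIntersection sg (PySem.List.pyGetD intersect i [])) then
        PySem.List.len (pvIntersection sg (PySem.List.pyGetD intersect i []))
      else tmpMax) 0
    = PySem.List.maxD (intersect.map (fun g => pvLenInter sg g)) (fun v => v) 0 := by
  simp only [pvLenInter]
  rw [PySem.List.foldl_pyRange_zero_pyGetD intersect []
      (fun tmpMax g => if tmpMax < PySem.List.len (pvIntersection sg g) then
        PySem.List.len (pvIntersection sg g) else tmpMax) 0]
  rw [← pv_fold_eq_maxD (intersect.map (fun g => PySem.List.len (pvIntersection sg g))) (by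
    intro v hv
    rcases List.mem_map.mp hv with ⟨g, _, rfl⟩
    simp [PySem.List.len_eq])]
  rw [List.foldl_map]

-- count of a group index in x's posting list: 1 exactly when the group at that index contains x
lemma pv_posting_count (L : List (List Int)) (s x k : Int) :
    ((((PySem.List.enumerate L s).flatMap
        (fun p => (PySem.Set.ofList p.2).map (fun y => (y, p.1)))).filter
          (fun p => p.1 == x)).map (·.2)).count k
    = if s ≤ k ∧ x ∈ L.getD (k - s).toNat [] then 1 else 0 := by
  induction L generalizing s with
  | nil => simp [PySem.List.enumerate_nil]
  | cons g t ih =>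
    rw [PySem.List.enumerate_cons, List.flatMap_cons, List.filter_append, List.map_append,
      List.count_append, ih (s + 1)]
    have hhead : ((((PySem.Set.ofList g).map (fun y => (y, s))).filter
        (fun p => p.1 == x)).map (·.2)).count k
        = if x ∈ g ∧ k = s then 1 else 0 := by
      rw [List.filter_map, List.map_map]
      have : ((PySem.Set.ofList g).filter ((fun p : Int × Int => p.1 == x) ∘ (fun y => (y, s))))
          = (PySem.Set.ofList g).filter (fun y => y == x) := by rfl
      rw [this]
      have hlen : ((PySem.Set.ofList g).filter (fun y => y == x)).length
          = if x ∈ g then 1 else 0 := by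
        by_cases hx : x ∈ g
        · have hmem : x ∈ PySem.Set.ofList g := (PySem.Set.mem_ofList g x).mpr hx
          have := List.count_eq_one_of_mem (PySem.Set.nodup_ofList g) hmem
          rw [List.count, List.countP_eq_length_filter] at this
          simpa [hx] using this
        · have hmem : x ∉ PySem.Set.ofList g := fun h => hx ((PySem.Set.mem_ofList g x).mp h)
          have := List.count_eq_zero_of_not_mem hmem
          rw [List.count, List.countP_eq_length_filter] at this
          simpa [hx] using this
      have hmapconst : (((PySem.Set.ofList g).filter (fun y => y == x)).map
          ((fun p : Int × Int => p.2) ∘ (fun y => (y, s))))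
          = List.replicate (((PySem.Set.ofList g).filter (fun y => y == x)).length) s := by
        have hco : ((fun p : Int × Int => p.2) ∘ (fun y : Int => (y, s))) = fun _ : Int => s := rfl
        rw [hco, List.map_const']
      rw [hmapconst, List.count_replicate, hlen]
      by_cases hks : k = s
      · subst hks; simp
      · have hks' : ¬ s = k := fun h => hks h.symm
        simp [hks, hks']
    rw [hhead]
    by_cases hks : k = s
    · have hts : ¬ (s + 1 ≤ k) := by omega
      have hkn : (k - s).toNat = 0 := by omega
      have hss : s ≤ k := by omega
      simp [hks]
    · by_cases hlt : s ≤ k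
      · have hk1 : s + 1 ≤ k := by omega
        have htn : (k - s).toNat = (k - (s + 1)).toNat + 1 := by omega
        simp [hks, hk1, hlt, htn]
      · have h2 : ¬ (s + 1 ≤ k) := by omega
        simp [hks, hlt, h2]

-- the posting lists the built index returns
lemma pv_index_getD (intersect : List (List Int)) (x : Int) :
    (pvIndex intersect).getD x []
      = ((pvPostings intersect).filter (fun p => p.1 == x)).map (·.2) := by
  rw [pvIndex, PySem.Dict.getD_foldl_modify_append]
  simp [PySem.Dict.getD_empty]

lemma pv_index_count (intersect : List (List Int)) (x k : Int) :
    ((pvIndex intersect).getD x []).count k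
      = if 0 ≤ k ∧ x ∈ intersect.getD k.toNat [] then 1 else 0 := by
  rw [pv_index_getD, pvPostings, pv_posting_count intersect 0 x k]
  simp

-- every index in a posting list is a valid position of intersect
lemma pv_index_mem (intersect : List (List Int)) (x i : Int)
    (h : i ∈ (pvIndex intersect).getD x []) : 0 ≤ i ∧ i.toNat < intersect.length := by
  have hc : 0 < ((pvIndex intersect).getD x []).count i := List.count_pos_iff.mpr h
  rw [pv_index_count] at hc
  by_cases hcond : 0 ≤ i ∧ x ∈ intersect.getD i.toNat []
  · refine ⟨hcond.1, ?_⟩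
    by_contra hge
    have : intersect.getD i.toNat [] = [] := List.getD_eq_default _ _ (by omega)
    rw [this] at hcond
    exact absurd hcond.2 (List.not_mem_nil)
  · rw [if_neg hcond] at hc; omega

-- the vote-increment loop adds the count of each position
lemma pv_applyPosting_length (P : List Int) (w : List Int) :
    (P.foldl (fun v i => PySem.List.pySetD v i (PySem.List.pyGetD v i 0 + 1)) w).length
      = w.length := by
  induction P generalizing w with
  | nil => rfl
  | cons i P' ih => rw [List.foldl_cons, ih, PySem.List.length_pySetD]

lemma pv_applyPosting_getD (P : List Int) (w : List Int) (j : Nat)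
    (hr : ∀ i ∈ P, 0 ≤ i ∧ i.toNat < w.length) :
    (P.foldl (fun v i => PySem.List.pySetD v i (PySem.List.pyGetD v i 0 + 1)) w).getD j 0
      = w.getD j 0 + P.count (j : Int) := by
  induction P generalizing w with
  | nil => simp
  | cons i P' ih =>
    rcases hr i (by simp) with ⟨hi0, hilen⟩
    have hset : PySem.List.pySetD w i (PySem.List.pyGetD w i 0 + 1)
        = w.set i.toNat (PySem.List.pyGetD w i 0 + 1) := PySem.List.pySetD_of_nonneg _ _ hi0
    rw [List.foldl_cons, ih _ (by
      intro a ha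
      rcases hr a (by simp [ha]) with ⟨h1, h2⟩
      rw [hset, List.length_set]
      exact ⟨h1, h2⟩)]
    have hcnt : (i :: P').count ((j : Nat) : Int)
        = P'.count ((j : Nat) : Int) + (if i = (j : Int) then 1 else 0) := by
      by_cases hij : i = (j : Int)
      · subst hij; simp
      · simp [hij]
    rw [hcnt]
    have hgd : (PySem.List.pySetD w i (PySem.List.pyGetD w i 0 + 1)).getD j 0
        = w.getD j 0 + (if i = (j : Int) then 1 else 0) := by
      have hlt' : i < (w.length : Int) := by omega
      have hpg : PySem.List.pyGetD w i 0 = w[i.toNat] := PySem.List.pyGetD_eq_getElem w 0 hi0 hlt'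
      rw [hset, hpg]
      by_cases hij : i = (j : Int)
      · have hj : i.toNat = j := by omega
        subst hj
        rw [List.getD_eq_getElem _ _ (by simpa using hilen),
          List.getElem_set_self, List.getD_eq_getElem _ _ hilen, if_pos hij]
      · have hne : i.toNat ≠ j := by omega
        by_cases hjlen : j < w.length
        · rw [List.getD_eq_getElem _ _ (by simpa using hjlen),
            List.getElem_set_ne hne, List.getD_eq_getElem _ _ hjlen, if_neg hij]
          omega
        · rw [List.getD_eq_default _ _ (by simpa using not_lt.mp hjlen),
            List.getD_eq_default _ _ (not_lt.mp hjlen), if_neg hij]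
          omega
    rw [hgd]
    by_cases hij : i = (j : Int)
    · simp [hij]; ring
    · simp [hij]

-- processing one element of sg bumps exactly the groups that contain it
lemma pv_step (intersect : List (List Int)) (c : List Int → Int) (x : Int) :
    ((pvIndex intersect).getD x []).foldl
      (fun v i => PySem.List.pySetD v i (PySem.List.pyGetD v i 0 + 1)) (intersect.map c)
    = intersect.map (fun g => c g + if x ∈ g then 1 else 0) := by
  apply List.ext_getElem
  · rw [pv_applyPosting_length]; simp
  · intro k h1 h2
    have hk : k < intersect.length := by simpa using h2
    rw [← List.getD_eq_getElem _ 0 h1, ← List.getD_eq_getElem _ 0 h2]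
    rw [pv_applyPosting_getD _ _ _ (by
      intro i hi
      rcases pv_index_mem intersect x i hi with ⟨ha, hb⟩
      exact ⟨ha, by simpa using hb⟩)]
    rw [pv_index_count]
    rw [List.getD_eq_getElem _ _ (by simpa using hk), List.getD_eq_getElem _ _ (by simpa using hk)]
    simp only [List.getElem_map, Int.toNat_natCast]
    have hk0 : (0 : Int) ≤ (k : Int) := by positivity
    simp [hk0, List.getElem?_eq_getElem hk]

-- the whole vote loop computes every group's overlap with sg
lemma pv_votes (intersect : List (List Int)) (sg : List Int) (c : List Int → Int) :
    sg.foldl (fun v x => ((pvIndex intersect).getD x []).foldl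
        (fun v i => PySem.List.pySetD v i (PySem.List.pyGetD v i 0 + 1)) v) (intersect.map c)
    = intersect.map (fun g => c g + pvLenInter sg g) := by
  induction sg generalizing c with
  | nil => simp [pv_lenInter_nil]
  | cons x t ih =>
    rw [List.foldl_cons, pv_step intersect c x,
      ih (fun g => c g + if x ∈ g then 1 else 0)]
    refine List.map_congr_left (fun g _ => ?_)
    rw [pv_lenInter_cons]
    ring

-- A's final comprehension over indices of 'paired = map f scenesGrouped' is a direct map
lemma pv_final_map (sG : List (List Int)) (tmp : List Int → Int) (F : Int → List Int → Int) :
    (PySem.List.pyRange 0 (PySem.List.len (sG.map tmp)) 1).map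
      (fun p => F (PySem.List.pyGetD (sG.map tmp) p 0) (PySem.List.pyGetD sG p []))
    = sG.map (fun sg => F (tmp sg) sg) := by
  rw [PySem.List.len_eq, List.length_map, PySem.List.pyRange_zero_nat, List.map_map]
  apply List.ext_getElem
  · simp
  · intro k h1 h2
    have hk : k < sG.length := by simpa using h2
    simp only [List.getElem_map, Function.comp] at *
    rw [List.getElem_range]
    rw [PySem.List.pyGetD_natCast, PySem.List.pyGetD_natCast]
    rw [List.getD_eq_getElem _ _ (by simpa using hk), List.getD_eq_getElem _ _ hk,
      List.getElem_map]

-- ===== VERDICT (by name: the statement is the Claim_ definition above) =====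
theorem computeMissedLinks_spec : Claim_equal_computeMissedLinks := by
  intro sG iL _
  unfold Spec_computeMissedLinks
  simp only [computeMissedLinks, computeMissedLinks_alt]
  rw [PySem.List.foldl_append_singleton_eq_map, PySem.List.foldl_append_singleton_eq_map,
    List.nil_append, List.nil_append]
  rw [pv_final_map sG _
      (fun paired sg => if paired > 1 then PySem.List.len sg - paired - 1
        else PySem.List.len sg - paired)]
  refine List.map_congr_left (fun sg _ => ?_)
  rw [pv_tmpMax_eq sg iL]
  rw [show (List.replicate iL.length (0 : Int)) = iL.map (fun _ => (0 : Int)) by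
    rw [List.map_const']]
  rw [pv_votes iL sg (fun _ => 0)]
  simp
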